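-- pv_equiv track=rewrite | github.com/huangd1999/FuzzingTransformerPrograms | execute/to_list.py | dyck1_func
-- ===== SOURCE A (Python) =====
-- def dyck1_func(s: str) -> str:
--     open_count = 0
--     result = []
--     invalid = False  # to keep track if we've entered an invalid state
--
--     for char in s:
--         if invalid:  # if we've previously determined it's invalid, all further chars will be "F"
--             result.append('F')
--             continue
--
--         if char == '(':
--             open_count += 1
--         elif char == ')':
--             open_count -= 1
--
--         if open_count == 0:
--             result.append('T')
--         elif open_count > 0:
--             result.append('P')
--         else:
--             result.append('F')
--             invalid = True
--
--     return result
-- ===== SOURCE B (Python) =====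
-- from itertools import accumulate
--
-- def dyck1_func(s: str) -> str:
--     bals = list(accumulate(1 if c == '(' else -1 if c == ')' else 0 for c in s))
--     k = next((i for i, b in enumerate(bals) if b < 0), len(s))
--     return ['T' if b == 0 else 'P' for b in bals[:k]] + ['F'] * (len(s) - k)
-- ===== Notes on version B (the rewrite author's own statement) =====
-- stated objective: alternative
-- what changed: Replaces A's single stateful loop (running counter plus a latched invalid flag) by a prefix-balance table built with itertools.accumulate, locating the first negative prefix balance and assembling the output as a mapped prefix region plus a replicated failure-label suffix.
import Mathlib
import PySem

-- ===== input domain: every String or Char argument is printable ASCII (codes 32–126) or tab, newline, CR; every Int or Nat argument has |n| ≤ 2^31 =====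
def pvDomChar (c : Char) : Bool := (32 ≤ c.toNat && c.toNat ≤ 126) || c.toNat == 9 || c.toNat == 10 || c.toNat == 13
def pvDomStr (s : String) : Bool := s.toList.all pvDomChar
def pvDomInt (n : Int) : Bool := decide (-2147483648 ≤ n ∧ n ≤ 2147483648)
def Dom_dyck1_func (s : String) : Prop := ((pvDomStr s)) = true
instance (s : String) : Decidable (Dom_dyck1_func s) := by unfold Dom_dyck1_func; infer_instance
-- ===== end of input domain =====

-- B replaces A's stateful loop (counter + latched invalid flag) by a prefix-balance table,
-- first-negative breakpoint, and a two-region output (mapped prefix ++ replicated failure-label suffix).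

-- ===== PORT A =====
-- one loop over the characters carrying (open_count, invalid, result)
def dyck1_func (s : String) : List String :=
  (s.toList.foldl (fun st c =>
      let o := st.1; let inv := st.2.1; let res := st.2.2
      if inv then (o, inv, res ++ ["F"])
      else
        let o' := if c = '(' then o + 1 else if c = ')' then o - 1 else o
        if o' = 0 then (o', false, res ++ ["T"])
        else if o' > 0 then (o', false, res ++ ["P"])
        else (o', true, res ++ ["F"]))
    ((0 : Int), false, ([] : List String))).2.2

-- ===== PORT B =====
-- itertools.accumulate of the per-char deltas, starting total a
def pvAccum (a : Int) : List Int → List Int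
  | [] => []
  | d :: ds => (a + d) :: pvAccum (a + d) ds

def dyck1_func_alt (s : String) : List String :=
  let bals := pvAccum 0 (s.toList.map (fun c => if c = '(' then (1 : Int) else if c = ')' then -1 else 0))
  let k := (bals.findIdx? (fun b => b < 0)).getD s.toList.length
  (bals.take k).map (fun b => if b = 0 then "T" else "P") ++ List.replicate (s.toList.length - k) "F"

-- ===== PRECONDITION & SPEC =====
def Spec_dyck1_func (s : String) (out : List String) : Prop := out = dyck1_func_alt s
instance (s : String) (out : List String) : Decidable (Spec_dyck1_func s out) := by unfold Spec_dyck1_func; infer_instance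

-- ===== CLAIM (what is proved, stated in full; the proofs are below) =====
def Claim_equal_dyck1_func : Prop := ∀ (s : String), Dom_dyck1_func s → Spec_dyck1_func s (dyck1_func s)

-- ===== LEMMAS AND PROOFS =====

-- A's loop as a structural recursion (no accumulator)
def aLoop : Int → Bool → List Char → List String
  | _, _, [] => []
  | o, inv, c :: cs =>
    if inv then "F" :: aLoop o inv cs
    else
      let o' := if c = '(' then o + 1 else if c = ')' then o - 1 else o
      if o' = 0 then "T" :: aLoop o' false cs
      else if o' > 0 then "P" :: aLoop o' false cs
      else "F" :: aLoop o' true cs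

-- B's body with an arbitrary starting balance, over a char list
def bOut (a : Int) (cs : List Char) : List String :=
  let bals := pvAccum a (cs.map (fun c => if c = '(' then (1 : Int) else if c = ')' then -1 else 0))
  let k := (bals.findIdx? (fun b => b < 0)).getD cs.length
  (bals.take k).map (fun b => if b = 0 then "T" else "P") ++ List.replicate (cs.length - k) "F"

theorem foldl_eq_aLoop (cs : List Char) (o : Int) (inv : Bool) (res : List String) :
    (cs.foldl (fun st c =>
      let o := st.1; let inv := st.2.1; let res := st.2.2
      if inv then (o, inv, res ++ ["F"])
      else
        let o' := if c = '(' then o + 1 else if c = ')' then o - 1 else o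
        if o' = 0 then (o', false, res ++ ["T"])
        else if o' > 0 then (o', false, res ++ ["P"])
        else (o', true, res ++ ["F"]))
      (o, inv, res)).2.2 = res ++ aLoop o inv cs := by
  induction cs generalizing o inv res with
  | nil => simp [aLoop]
  | cons c cs ih =>
    simp only [List.foldl_cons, aLoop]
    split_ifs <;> simp [ih]

theorem aLoop_true (o : Int) (cs : List Char) :
    aLoop o true cs = List.replicate cs.length "F" := by
  induction cs generalizing o with
  | nil => rfl
  | cons c cs ih => simp [aLoop, ih, List.replicate_succ]

theorem aLoop_eq_bOut (cs : List Char) (a : Int) (ha : 0 ≤ a) :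
    aLoop a false cs = bOut a cs := by
  induction cs generalizing a with
  | nil => rfl
  | cons c cs ih =>
    have hd : ∀ (x : Int), (if c = '(' then x + 1 else if c = ')' then x - 1 else x)
        = x + (if c = '(' then (1 : Int) else if c = ')' then -1 else 0) := by
      intro x; split_ifs <;> ring
    set d : Int := if c = '(' then (1 : Int) else if c = ')' then -1 else 0 with hdd
    have hdlb : -1 ≤ d := by rw [hdd]; split_ifs <;> norm_num
    simp only [aLoop, Bool.false_eq_true, if_false, hd, bOut, List.map_cons, pvAccum,
      List.length_cons, List.findIdx?_cons, decide_eq_true_eq]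
    simp only [← hdd]
    by_cases hneg : a + d < 0
    · have h0 : ¬ (a + d = 0) := by omega
      have h1 : ¬ (a + d > 0) := by omega
      rw [if_neg h0, if_neg h1, if_pos hneg, aLoop_true]
      simp [List.replicate_succ]
    · have hge : 0 ≤ a + d := by omega
      have hrec := ih (a + d) hge
      rw [if_neg hneg]
      simp only [bOut] at hrec
      cases hfi : (pvAccum (a + d) (cs.map (fun c => if c = '(' then (1 : Int) else if c = ')' then -1 else 0))).findIdx? (fun b => b < 0) with
      | none =>
        rw [hfi] at hrec
        simp only [Option.map_none, Option.getD_none] at hrec ⊢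
        have h2 : cs.length + 1 - (cs.length + 1) = 0 := by omega
        rw [h2, List.take_succ_cons, List.map_cons, List.replicate_zero, List.append_nil]
        have h3 : cs.length - cs.length = 0 := by omega
        rw [h3, List.replicate_zero, List.append_nil] at hrec
        by_cases h0 : a + d = 0
        · have h1 : ¬ (a + d > 0) := by omega
          rw [if_pos h0, if_pos h0, hrec]
        · have h1 : a + d > 0 := by omega
          rw [if_neg h0, if_pos h1, if_neg h0, hrec]
      | some j =>
        rw [hfi] at hrec
        simp only [Option.map_some, Option.getD_some] at hrec ⊢
        have h2 : cs.length + 1 - (j + 1) = cs.length - j := by omega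
        rw [h2, List.take_succ_cons, List.map_cons]
        by_cases h0 : a + d = 0
        · rw [if_pos h0, if_pos h0, hrec]; simp
        · have h1 : a + d > 0 := by omega
          rw [if_neg h0, if_pos h1, if_neg h0, hrec]; simp

theorem bOut_toList (s : String) : dyck1_func_alt s = bOut 0 s.toList := rfl

-- ===== VERDICT (by name: the statement is the Claim_ definition above) =====
theorem dyck1_func_spec : Claim_equal_dyck1_func := by
  intro s _
  unfold Spec_dyck1_func
  rw [bOut_toList, ← aLoop_eq_bOut s.toList 0 le_rfl]
  unfold dyck1_func
  rw [foldl_eq_aLoop]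
  simp
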